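-- pv_equiv track=rewrite | github.com/birdswimming/trm-multi | dataset/prepare_mul.py | render_vertical_multiplication_with_addition
-- ===== SOURCE A (Python) =====
-- def render_vertical_multiplication_with_addition(a: int, b: int) -> tuple[list[str], int, int]:
--     """
--     将 a * b 以竖式乘法格式渲染为 width x height 的字符块。
--     - 不含分割线；
--     - 空格全部用 '_'；
--     - 每行末尾额外加 '#'（不在画布内）。
--     """
--     sa = str(a)
--     sb = str(b)
--     # 从低位到高位生成部分积
--     mul_partials_nums = [a * int(d) for d in reversed(sb)]
--     mul_partials = [str(p) for p in mul_partials_nums]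
--     add_partials_nums = []
--     sum = 0
--     for i, p in enumerate(mul_partials_nums):
--         sum += p * (10**i)
--         add_partials_nums.append(sum)
--     final = str(a * b)
--     add_partials = [str(p) for p in add_partials_nums]
--
--     # 需要的总行数（不含空行）：被乘数 + 乘数 + 每个部分积
--     used_rows = 2 + len(mul_partials) + len(add_partials)
--     used_cols = len(final)
--
--     results = []
--     padded_sa = '_' * (used_cols - len(sa)) + sa
--     results.append(padded_sa)
--     padded_sb = '_' * (used_cols - len(sb)) + sb
--     results.append(padded_sb)
--     for i, partial in enumerate(mul_partials):
--         padded_partial = partial + i * '_'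
--         padded_partial = '_' * (used_cols - len(padded_partial)) + padded_partial
--         results.append(padded_partial)
--     for partial in add_partials:
--         padded_partial = '_' * (used_cols - len(partial)) + partial
--         results.append(padded_partial)
--     # results.append(padded_final)
--     return results, used_rows, used_cols
-- ===== SOURCE B (Python) =====
-- def render_vertical_multiplication_with_addition(a: int, b: int) -> tuple[list[str], int, int]:
--     # Arithmetic re-implementation (defined for b >= 0, where A returns):
--     # digits of b by repeated divmod instead of parsing str(b), each cumulative
--     # partial in closed form a * (b % 10**(i+1)) instead of a running sum, and
--     # one rjust pass for the padding.
--     digits = []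
--     n = b
--     while True:
--         digits.append(n % 10)
--         n //= 10
--         if n == 0:
--             break
--     rows = [str(a), str(b)] \
--         + [str(a * d) + '_' * i for i, d in enumerate(digits)] \
--         + [str(a * (b % 10 ** (i + 1))) for i in range(len(digits))]
--     width = len(str(a * b))
--     return [r.rjust(width, '_') for r in rows], 2 + 2 * len(digits), width
-- ===== Notes on version B (the rewrite author's own statement) =====
-- stated objective: alternative
-- what changed: B extracts b's digits by repeated divmod instead of parsing the characters of str(b), replaces A's running-sum accumulator over enumerate with the closed form a * (b % 10**(i+1)) per row, and does the padding in a single rjust comprehension instead of per-loop manual pads.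
import Mathlib
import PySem

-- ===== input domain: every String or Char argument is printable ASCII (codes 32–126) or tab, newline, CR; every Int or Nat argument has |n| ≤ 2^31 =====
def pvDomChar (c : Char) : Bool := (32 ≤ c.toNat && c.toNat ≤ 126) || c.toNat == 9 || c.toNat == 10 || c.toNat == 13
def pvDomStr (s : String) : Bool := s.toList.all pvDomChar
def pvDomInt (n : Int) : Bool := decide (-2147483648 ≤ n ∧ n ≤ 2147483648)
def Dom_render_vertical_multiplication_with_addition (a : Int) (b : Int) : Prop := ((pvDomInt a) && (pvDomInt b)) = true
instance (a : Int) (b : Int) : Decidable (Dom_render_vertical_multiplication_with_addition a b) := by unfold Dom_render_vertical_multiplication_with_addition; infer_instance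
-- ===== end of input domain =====

-- B replaces A's str(b)-parsing digit loop by divmod digit extraction and A's
-- running-sum accumulator by the closed form a * (b % 10**(i+1)); alternative
-- decomposition, same cost.


-- ===== PORT A =====
-- '_' * (w - len(s)) + s  (Python's negative string repetition is '': Int.toNat clamps)
def pyPad (w : Int) (s : List Char) : List Char :=
  List.replicate (w - (s.length : Int)).toNat '_' ++ s

-- int(d) for a single character d; under Pre_ (0 ≤ b) every parsed character is a
-- decimal digit, so ofChars? is always `some` and the default is never taken.
def pyDigit (c : Char) : Int := (PySem.Int.ofChars? [c]).getD 0

def render_vertical_multiplication_with_addition (a : Int) (b : Int) : List String × Int × Int :=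
  let sa := PySem.Int.toChars a
  let sb := PySem.Int.toChars b
  let mulPartialsNums := sb.reverse.map (fun d => a * pyDigit d)
  let mulPartials := mulPartialsNums.map PySem.Int.toChars
  -- running-sum loop: sum += p * 10**i; append(sum)   (i from enumerate is ≥ 0, so ^i.toNat is exact)
  let addPartialsNums :=
    ((PySem.List.enumerate mulPartialsNums 0).foldl
      (fun (st : Int × List Int) ip =>
        let s := st.1 + ip.2 * 10 ^ ip.1.toNat
        (s, st.2 ++ [s])) (0, [])).2
  let final := PySem.Int.toChars (a * b)
  let addPartials := addPartialsNums.map PySem.Int.toChars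
  let usedRows : Int := 2 + (mulPartials.length : Int) + (addPartials.length : Int)
  let usedCols : Int := (final.length : Int)
  let results : List (List Char) := [pyPad usedCols sa, pyPad usedCols sb]
  let results := (PySem.List.enumerate mulPartials 0).foldl
    (fun acc ip => acc ++ [pyPad usedCols (ip.2 ++ List.replicate ip.1.toNat '_')]) results
  let results := addPartials.foldl (fun acc p => acc ++ [pyPad usedCols p]) results
  (results.map String.ofList, usedRows, usedCols)

-- ===== PORT B =====
-- B's do-while divmod loop; Python B's loop terminates exactly for b ≥ 0 (= Pre_),
-- so the port reads the digits of b.toNat.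
def altDigits (n : Nat) : List Int :=
  if _h : n / 10 = 0 then [((n % 10 : Nat) : Int)]
  else ((n % 10 : Nat) : Int) :: altDigits (n / 10)
termination_by n
decreasing_by exact Nat.div_lt_self (by omega) (by omega)

-- r.rjust(width, '_')
def altPad (w : Int) (s : List Char) : List Char :=
  List.replicate (w - (s.length : Int)).toNat '_' ++ s

def render_vertical_multiplication_with_addition_alt (a : Int) (b : Int) : List String × Int × Int :=
  let digits := altDigits b.toNat
  let rows : List (List Char) :=
    [PySem.Int.toChars a, PySem.Int.toChars b]
    ++ (PySem.List.enumerate digits 0).map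
        (fun id => PySem.Int.toChars (a * id.2) ++ List.replicate id.1.toNat '_')
    ++ (PySem.List.pyRange 0 (PySem.List.len digits) 1).map
        (fun i => PySem.Int.toChars (a * PySem.Int.mod b (10 ^ (i + 1).toNat)))
  let width : Int := ((PySem.Int.toChars (a * b)).length : Int)
  (rows.map (fun r => String.ofList (altPad width r)), 2 + 2 * (digits.length : Int), width)

-- ===== PRECONDITION & SPEC =====
-- A raises ValueError for b < 0 (int('-') on the reversed sign character), so Pre_ is 0 ≤ b.
def Pre_render_vertical_multiplication_with_addition (a : Int) (b : Int) : Prop := 0 ≤ b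
instance (a : Int) (b : Int) : Decidable (Pre_render_vertical_multiplication_with_addition a b) := by unfold Pre_render_vertical_multiplication_with_addition; infer_instance
def pvWitness_render_vertical_multiplication_with_addition : Int × Int := (12, 34)

def Spec_render_vertical_multiplication_with_addition (a : Int) (b : Int) (out : List String × Int × Int) : Prop := out = render_vertical_multiplication_with_addition_alt a b
instance (a : Int) (b : Int) (out : List String × Int × Int) : Decidable (Spec_render_vertical_multiplication_with_addition a b out) := by unfold Spec_render_vertical_multiplication_with_addition; infer_instance

-- ===== CLAIM (what is proved, stated in full; the proofs are below) =====
def Claim_equal_render_vertical_multiplication_with_addition : Prop := ∀ (a : Int) (b : Int), Dom_render_vertical_multiplication_with_addition a b → Pre_render_vertical_multiplication_with_addition a b → Spec_render_vertical_multiplication_with_addition a b (render_vertical_multiplication_with_addition a b)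

-- ===== LEMMAS AND PROOFS =====

-- int(c) of a decimal digit character
theorem pyDigit_digitChar (d : Nat) (h : d < 10) : pyDigit (Nat.digitChar d) = (d : Int) := by
  interval_cases d <;> decide

-- the reversed characters of str(n) (n ≥ 0), parsed one by one, are B's divmod digits
theorem toDigits_reverse_parse (n : Nat) :
    (Nat.toDigits 10 n).reverse.map pyDigit = altDigits n := by
  induction n using Nat.strong_induction_on with
  | _ n ih =>
    rw [Nat.toDigits_eq_if (by norm_num)]
    by_cases h : n < 10
    · rw [if_pos h, altDigits]
      rw [dif_pos (Nat.div_eq_of_lt h)]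
      simp [pyDigit_digitChar n h, Nat.mod_eq_of_lt h]
    · rw [if_neg h, altDigits]
      rw [dif_neg (by omega : ¬ n / 10 = 0)]
      simp only [List.reverse_append, List.reverse_cons, List.reverse_nil, List.nil_append,
        List.cons_append, List.map_cons]
      rw [pyDigit_digitChar (n % 10) (Nat.mod_lt _ (by norm_num)),
        ih (n / 10) (Nat.div_lt_self (by omega) (by norm_num))]

-- enumerate over a mapped list
theorem enumerate_map {α β : Type} (h : α → β) (xs : List α) :
    ∀ s : Int, PySem.List.enumerate (xs.map h) s
      = (PySem.List.enumerate xs s).map (fun p => (p.1, h p.2)) := by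
  induction xs with
  | nil => intro s; simp [PySem.List.enumerate_nil]
  | cons x t iht =>
    intro s
    simp [PySem.List.enumerate_cons, iht (s + 1)]

-- the cumulative-sum list A's running-sum loop produces
def cumSums (xs : List Int) (k : Nat) (s0 : Int) : List Int :=
  match xs with
  | [] => []
  | x :: t => (s0 + x * 10 ^ k) :: cumSums t (k + 1) (s0 + x * 10 ^ k)

-- A's fold, characterised
theorem fold_eq_cumSums (xs : List Int) :
    ∀ (k : Nat) (s0 : Int) (acc : List Int),
      (PySem.List.enumerate xs (k : Int)).foldl
        (fun (st : Int × List Int) ip =>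
          (st.1 + ip.2 * 10 ^ ip.1.toNat, st.2 ++ [st.1 + ip.2 * 10 ^ ip.1.toNat])) (s0, acc)
      = ((cumSums xs k s0).getLastD s0, acc ++ cumSums xs k s0) := by
  induction xs with
  | nil => intro k s0 acc; simp [PySem.List.enumerate_nil, cumSums]
  | cons x t iht =>
    intro k s0 acc
    have hcast : (k : Int) + 1 = ((k + 1 : Nat) : Int) := by push_cast; ring
    rw [PySem.List.enumerate_cons, List.foldl_cons, hcast]
    have hinit : ((s0, acc).1 + (((k : Int), x)).2 * 10 ^ (((k : Int), x)).1.toNat,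
          (s0, acc).2 ++ [(s0, acc).1 + (((k : Int), x)).2 * 10 ^ (((k : Int), x)).1.toNat])
        = ((s0 + x * 10 ^ k, acc ++ [s0 + x * 10 ^ k]) : Int × List Int) := by simp
    rw [hinit, iht (k + 1) (s0 + x * 10 ^ k) (acc ++ [s0 + x * 10 ^ k])]
    simp only [cumSums, List.getLastD_cons, List.append_assoc, List.singleton_append]

-- cumulative sums of a * digits of (M / 10^k), started at a * (M % 10^k),
-- are the closed-form partials a * (M % 10^(k+i+1))
theorem cumSums_altDigits (a : Int) (M : Nat) :
    ∀ (m k : Nat), m = M / 10 ^ k →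
      cumSums ((altDigits m).map (fun x => a * x)) k (a * ((M % 10 ^ k : Nat) : Int))
      = (List.range (altDigits m).length).map
          (fun i => a * ((M % 10 ^ (k + i + 1) : Nat) : Int)) := by
  intro m
  induction m using Nat.strong_induction_on with
  | _ m ih =>
    intro k hm
    have hstep : a * ((M % 10 ^ k : Nat) : Int) + a * ((m % 10 : Nat) : Int) * 10 ^ k
        = a * ((M % 10 ^ (k + 1) : Nat) : Int) := by
      have h1 : M % 10 ^ (k + 1) = M % 10 ^ k + 10 ^ k * (M / 10 ^ k % 10) := Nat.mod_pow_succ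
      rw [h1, hm]; push_cast; ring
    rw [altDigits]
    by_cases h : m / 10 = 0
    · rw [dif_pos h]
      simp only [List.map_cons, List.map_nil, cumSums, List.length_cons, List.length_nil]
      simp only [List.range_succ_eq_map, List.range_zero, List.map_nil, List.map_cons]
      rw [hstep]
    · rw [dif_neg h]
      simp only [List.map_cons, cumSums, List.length_cons]
      rw [hstep]
      have hm' : m / 10 = M / 10 ^ (k + 1) := by
        rw [hm, Nat.div_div_eq_div_mul, pow_succ]
      rw [ih (m / 10) (by exact Nat.div_lt_self (by omega) (by norm_num)) (k + 1) hm']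
      rw [List.range_succ_eq_map]
      simp only [List.map_cons, List.map_map]
      refine List.cons_eq_cons.mpr ⟨by norm_num, ?_⟩
      refine List.map_congr_left fun i _ => ?_
      simp only [Function.comp_apply, Nat.succ_eq_add_one]
      have he : k + 1 + i + 1 = k + (i + 1) + 1 := by omega
      rw [he]

-- ===== VERDICT (by name: the statement is the Claim_ definition above) =====
theorem pad_eq : pyPad = altPad := rfl

theorem render_vertical_multiplication_with_addition_spec : Claim_equal_render_vertical_multiplication_with_addition := by
  intro a b _ hpre
  unfold Spec_render_vertical_multiplication_with_addition
  unfold Pre_render_vertical_multiplication_with_addition at hpre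
  obtain ⟨m, rfl⟩ : ∃ m : Nat, b = (m : Int) := ⟨b.toNat, (Int.toNat_of_nonneg hpre).symm⟩
  have hsb : PySem.Int.toChars (m : Int) = Nat.toDigits 10 m := by
    rw [PySem.Int.toChars, if_neg (by exact_mod_cast not_lt.mpr (Int.natCast_nonneg m)),
      Int.toNat_natCast]
  have hmul : (Nat.toDigits 10 m).reverse.map (fun d => a * pyDigit d)
      = (altDigits m).map (fun x => a * x) := by
    rw [← toDigits_reverse_parse m, List.map_map]
    rfl
  have hadd : ((PySem.List.enumerate ((Nat.toDigits 10 m).reverse.map (fun d => a * pyDigit d)) 0).foldl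
        (fun (st : Int × List Int) ip =>
          (st.1 + ip.2 * 10 ^ ip.1.toNat, st.2 ++ [st.1 + ip.2 * 10 ^ ip.1.toNat])) (0, [])).2
      = (List.range (altDigits m).length).map (fun i => a * ((m % 10 ^ (i + 1) : Nat) : Int)) := by
    rw [hmul, show (0 : Int) = ((0 : Nat) : Int) from rfl, fold_eq_cumSums]
    simp only [Nat.cast_zero, List.nil_append]
    have hc := cumSums_altDigits a m m 0 (by simp)
    have h0 : a * (((m % 10 ^ (0 : Nat) : Nat)) : Int) = 0 := by simp
    rw [h0] at hc
    rw [hc]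
    simp
  simp only [render_vertical_multiplication_with_addition,
    render_vertical_multiplication_with_addition_alt, Int.toNat_natCast]
  simp only [hsb, hadd, PySem.List.foldl_append_singleton_eq_map]
  simp only [hmul, List.map_map, enumerate_map, PySem.List.len_eq,
    PySem.List.pyRange_zero_natCast, pad_eq]
  simp only [Prod.mk.injEq]
  refine ⟨?_, ?_, ?_⟩
  · -- the rows
    simp only [List.map_append, List.map_map, List.map_cons,
      List.cons_append, List.nil_append, Function.comp_def]
    simp
  · -- used_rows
    simp only [List.length_map, List.length_range]
    ring
  · -- used_cols
    trivial
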